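-- pv_equiv track=rewrite | github.com/leeyang1991/python-ternary | ternary/plotting.py | simplex_points
-- ===== SOURCE A (Python) =====
-- def simplex_points(steps=100, boundary=True):
--     """Systematically iterate through a lattice of points on the simplex."""
--     steps = steps - 1
--     start = 0
--     if not boundary:
--         start = 1
--     for x1 in range(start, steps + (1-start)):
--         for x2 in range(start, steps + (1-start) - x1):
--             x3 = steps - x1 - x2
--             yield (x1, x2, x3)
-- ===== SOURCE B (Python) =====
-- def _compositions(total, parts, low):
--     """Yield all tuples of `parts` integers, each >= low, summing to `total`,
--     in lexicographic order."""
--     if parts == 1: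
--         if total >= low:
--             yield (total,)
--         return
--     for first in range(low, total - (parts - 1) * low + 1):
--         for rest in _compositions(total - first, parts - 1, low):
--             yield (first,) + rest
--
-- def simplex_points(steps=100, boundary=True):
--     """Systematically iterate through a lattice of points on the simplex."""
--     low = 0 if boundary else 1
--     yield from _compositions(steps - 1, 3, low)
-- ===== Notes on version B (the rewrite author's own statement) =====
-- stated objective: alternative
-- what changed: Replaces the hand-written nested double loop with explicit x3 arithmetic by a recursive generator that enumerates all 3-part compositions of steps-1 with parts bounded below by 0 or 1.
import Mathlib
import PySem

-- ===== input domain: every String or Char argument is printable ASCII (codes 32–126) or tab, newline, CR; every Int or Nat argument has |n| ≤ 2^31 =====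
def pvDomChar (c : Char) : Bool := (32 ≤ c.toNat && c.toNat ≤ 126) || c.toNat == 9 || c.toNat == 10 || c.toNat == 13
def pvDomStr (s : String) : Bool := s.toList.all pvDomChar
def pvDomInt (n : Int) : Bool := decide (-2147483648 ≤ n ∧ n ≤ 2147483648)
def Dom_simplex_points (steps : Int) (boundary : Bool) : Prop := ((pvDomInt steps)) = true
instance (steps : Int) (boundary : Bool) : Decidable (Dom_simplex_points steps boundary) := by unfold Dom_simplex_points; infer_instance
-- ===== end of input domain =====

-- B enumerates the lattice points as the 3-part compositions of steps-1 (parts bounded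
-- below by 0 or 1) via a recursive generator instead of A's nested double loop (alternative, not faster).

-- ===== PORT A =====
-- generator with nested for-loops → flatMap over the outer range of a map over the inner range
def simplex_points (steps : Int) (boundary : Bool) : List (Int × Int × Int) :=
  let steps1 := steps - 1
  let start : Int := if !boundary then 1 else 0
  (PySem.List.pyRange start (steps1 + (1 - start)) 1).flatMap fun x1 =>
    (PySem.List.pyRange start (steps1 + (1 - start) - x1) 1).map fun x2 =>
      (x1, x2, steps1 - x1 - x2)

-- ===== PORT B =====
-- Source B's recursive generator _compositions; Python's tuples of length `parts` become lists
def pvCompositions (total : Int) (parts : Nat) (low : Int) : List (List Int) :=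
  match parts with
  | 0 => []                                         -- unreachable: B only calls with parts ≥ 1
  | 1 => if low ≤ total then [[total]] else []
  | (n+2) =>
      (PySem.List.pyRange low (total - ((n : Int) + 1) * low + 1) 1).flatMap fun first =>
        (pvCompositions (total - first) (n + 1) low).map fun rest => first :: rest

def simplex_points_alt (steps : Int) (boundary : Bool) : List (Int × Int × Int) :=
  let low : Int := if boundary then 0 else 1
  (pvCompositions (steps - 1) 3 low).map fun l =>
    match l with
    | [a, b, c] => (a, b, c)
    | _ => (0, 0, 0)                                -- unreachable: 3-part compositions have length 3

-- ===== PRECONDITION & SPEC =====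
def Spec_simplex_points (steps : Int) (boundary : Bool) (out : List (Int × Int × Int)) : Prop := out = simplex_points_alt steps boundary
instance (steps : Int) (boundary : Bool) (out : List (Int × Int × Int)) : Decidable (Spec_simplex_points steps boundary out) := by unfold Spec_simplex_points; infer_instance

-- ===== CLAIM (what is proved, stated in full; the proofs are below) =====
def Claim_equal_simplex_points : Prop := ∀ (steps : Int) (boundary : Bool), Dom_simplex_points steps boundary → Spec_simplex_points steps boundary (simplex_points steps boundary)

-- ===== LEMMAS AND PROOFS =====

-- flatMap of singletons is a map
theorem pvFlatMap_single {α β : Type} (l : List α) (g : α → β) :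
    l.flatMap (fun x => [g x]) = l.map g := by
  induction l with
  | nil => rfl
  | cons a t ih => simp [ih]

-- 2-part compositions: the inner `if` holds on every member of the range, so flatMap is a map
theorem pvCompositions_two (m low : Int) :
    pvCompositions m 2 low =
      (PySem.List.pyRange low (m - low + 1) 1).map (fun x2 => [x2, m - x2]) := by
  show (PySem.List.pyRange low (m - ((0 : Int) + 1) * low + 1) 1).flatMap
        (fun first => (pvCompositions (m - first) 1 low).map fun rest => first :: rest) = _
  rw [show m - ((0 : Int) + 1) * low + 1 = m - low + 1 by ring]
  rw [List.flatMap_congr (g := fun x2 => [[x2, m - x2]]) ?_]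
  · exact pvFlatMap_single _ _
  · intro x hx
    rw [PySem.List.mem_pyRange_one] at hx
    simp only [pvCompositions, if_pos (by omega : low ≤ m - x), List.map_cons, List.map_nil]

-- 3-part compositions: the nested comprehension
theorem pvCompositions_three (m low : Int) :
    pvCompositions m 3 low =
      (PySem.List.pyRange low (m - 2 * low + 1) 1).flatMap fun x1 =>
        (PySem.List.pyRange low (m - x1 - low + 1) 1).map fun x2 => [x1, x2, m - x1 - x2] := by
  show (PySem.List.pyRange low (m - ((1 : Int) + 1) * low + 1) 1).flatMap
        (fun first => (pvCompositions (m - first) 2 low).map fun rest => first :: rest) = _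
  rw [show m - ((1 : Int) + 1) * low + 1 = m - 2 * low + 1 by ring]
  refine List.flatMap_congr ?_
  intro x1 _
  rw [pvCompositions_two, List.map_map]
  exact List.map_congr_left (fun x2 _ => rfl)

-- B's port written as A-shaped nested ranges over triples
theorem alt_eq (m low : Int) :
    ((pvCompositions m 3 low).map fun l =>
        match l with
        | [a, b, c] => (a, b, c)
        | _ => ((0 : Int), (0 : Int), (0 : Int))) =
      ((PySem.List.pyRange low (m - 2 * low + 1) 1).flatMap fun x1 =>
        (PySem.List.pyRange low (m - x1 - low + 1) 1).map fun x2 => (x1, x2, m - x1 - x2)) := by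
  rw [pvCompositions_three]
  rw [List.map_flatMap]
  refine List.flatMap_congr ?_
  intro x1 _
  rw [List.map_map]
  exact List.map_congr_left (fun x2 _ => rfl)

-- ===== VERDICT (by name: the statement is the Claim_ definition above) =====
theorem simplex_points_spec : Claim_equal_simplex_points := by
  intro steps boundary _
  unfold Spec_simplex_points simplex_points simplex_points_alt
  cases boundary
  · -- boundary = false : low = 1; A's outer range has one extra trailing x1 with empty inner range
    norm_num
    rw [alt_eq]
    set m := steps - 1 with hm
    by_cases h1 : m ≤ 1
    · rw [PySem.List.pyRange_one_eq_nil (by omega : m ≤ 1),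
          PySem.List.pyRange_one_eq_nil (by omega : m - 2 * 1 + 1 ≤ 1)]
      rfl
    · have e := PySem.List.pyRange_one_succ_right (a := (1 : Int)) (b := m - 1) (by omega)
      rw [show m - 1 + 1 = m by ring] at e
      rw [e, List.flatMap_append]
      simp only [List.flatMap_cons, List.flatMap_nil, List.append_nil]
      rw [PySem.List.pyRange_one_eq_nil (by omega : m - (m - 1) ≤ 1),
          List.map_nil, List.append_nil]
      rw [show m - 2 * 1 + 1 = m - 1 by ring]
      refine List.flatMap_congr ?_
      intro x1 _
      rw [show m - x1 - 1 + 1 = m - x1 by ring]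
  · -- boundary = true : low = 0; the two nested comprehensions have identical bounds
    norm_num
    rw [alt_eq]
    rw [show steps - 1 - 2 * 0 + 1 = steps by ring]
    refine List.flatMap_congr ?_
    intro x1 _
    rw [show steps - 1 - x1 - 0 + 1 = steps - x1 by ring]
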